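-- pv_equiv track=rewrite | github.com/Matars/gitfetch | src/gitfetch/calculations.py | calculate_streaks
-- ===== SOURCE A (Python) =====
-- from typing import Dict, Any, List, Tuple
--
-- def calculate_streaks(weeks_data: List[Dict[str, Any]]) -> Tuple[int, int]:
--     """
--     Calculate both current and max contribution streaks from weeks data.
--
--     Args:
--         weeks_data: List of weeks with contribution data
--
--     Returns:
--         Tuple of (current_streak, max_streak)
--     """
--     if not weeks_data:
--         return 0, 0
--
--     all_contributions = []
--     for week in weeks_data:
--         for day in week.get("contributionDays", []):
--             all_contributions.append(day.get("contributionCount", 0))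
--
--     all_contributions.reverse()
--
--     current_streak = 0
--     max_streak = 0
--     temp_streak = 0
--
--     for contrib in all_contributions:
--         if contrib > 0:
--             current_streak += 1
--             temp_streak += 1
--             if temp_streak > max_streak:
--                 max_streak = temp_streak
--         else:
--             break
--
--     return current_streak, max_streak
-- ===== SOURCE B (Python) =====
-- from typing import Dict, Any, List, Tuple
--
-- def calculate_streaks(weeks_data: List[Dict[str, Any]]) -> Tuple[int, int]:
--     """Single nested reverse traversal: no flat list, no reverse(), one streak counter."""
--     streak = 0
--     for week in reversed(weeks_data):
--         for day in reversed(week.get("contributionDays", [])):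
--             if day.get("contributionCount", 0) > 0:
--                 streak += 1
--             else:
--                 return streak, streak
--     return streak, streak
-- ===== Notes on version B (the rewrite author's own statement) =====
-- stated objective: simpler
-- what changed: B drops the intermediate flat contributions list, its reversal and the redundant max/temp streak counters; it walks weeks and days in reverse directly, counting one streak and returning (s, s) since max_streak always equals current_streak in A.
import Mathlib
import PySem

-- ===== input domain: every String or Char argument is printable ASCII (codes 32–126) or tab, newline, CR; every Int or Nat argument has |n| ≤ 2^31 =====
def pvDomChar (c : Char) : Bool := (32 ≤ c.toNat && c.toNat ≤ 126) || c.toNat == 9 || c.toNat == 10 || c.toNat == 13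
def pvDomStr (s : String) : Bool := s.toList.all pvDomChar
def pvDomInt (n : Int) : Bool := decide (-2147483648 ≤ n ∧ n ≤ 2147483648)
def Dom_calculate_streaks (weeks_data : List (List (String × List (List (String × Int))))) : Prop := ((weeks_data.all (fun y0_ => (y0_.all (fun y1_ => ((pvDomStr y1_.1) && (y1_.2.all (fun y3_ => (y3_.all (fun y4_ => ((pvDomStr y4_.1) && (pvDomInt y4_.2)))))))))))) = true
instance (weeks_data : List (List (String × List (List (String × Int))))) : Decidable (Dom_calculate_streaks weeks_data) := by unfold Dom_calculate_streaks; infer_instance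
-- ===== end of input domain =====

-- B drops A's flat list + reverse + max/temp counters: one nested reverse traversal counting a single streak (objective: simpler).


-- week.get("contributionDays", []) — first-match association-list lookup with default
def pvGetDays (week : List (String × List (List (String × Int)))) : List (List (String × Int)) :=
  (List.lookup "contributionDays" week).getD []
-- day.get("contributionCount", 0)
def pvGetCount (day : List (String × Int)) : Int :=
  (List.lookup "contributionCount" day).getD 0

-- ===== PORT A =====
-- the 'for contrib in all_contributions' loop with its break, state (current_streak, max_streak, temp_streak)
def pvALoop : List Int → Int → Int → Int → Int × Int
  | [], cur, mx, _ => (cur, mx)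
  | c :: rest, cur, mx, tmp =>
    if c > 0 then
      let cur' := cur + 1
      let tmp' := tmp + 1
      let mx' := if tmp' > mx then tmp' else mx
      pvALoop rest cur' mx' tmp'
    else (cur, mx)

def calculate_streaks (weeks_data : List (List (String × List (List (String × Int))))) : Int × Int :=
  if weeks_data = [] then (0, 0)
  else
    let all_contributions := weeks_data.foldl
      (fun acc week => (pvGetDays week).foldl (fun acc day => acc ++ [pvGetCount day]) acc) []
    pvALoop all_contributions.reverse 0 0 0

-- ===== PORT B =====
-- inner 'for day in reversed(...)' loop: Bool = early return taken
def pvBDays : List (List (String × Int)) → Int → Int × Bool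
  | [], s => (s, false)
  | day :: rest, s =>
    if pvGetCount day > 0 then pvBDays rest (s + 1) else (s, true)

-- outer 'for week in reversed(weeks_data)' loop
def pvBWeeks : List (List (String × List (List (String × Int)))) → Int → Int
  | [], s => s
  | wk :: rest, s =>
    match pvBDays (pvGetDays wk).reverse s with
    | (s', true) => s'
    | (s', false) => pvBWeeks rest s'

def calculate_streaks_alt (weeks_data : List (List (String × List (List (String × Int))))) : Int × Int :=
  let s := pvBWeeks weeks_data.reverse 0
  (s, s)

-- ===== PRECONDITION & SPEC =====
def Spec_calculate_streaks (weeks_data : List (List (String × List (List (String × Int))))) (out : Int × Int) : Prop := out = calculate_streaks_alt weeks_data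
instance (weeks_data : List (List (String × List (List (String × Int))))) (out : Int × Int) : Decidable (Spec_calculate_streaks weeks_data out) := by unfold Spec_calculate_streaks; infer_instance

-- ===== CLAIM (what is proved, stated in full; the proofs are below) =====
def Claim_equal_calculate_streaks : Prop := ∀ (weeks_data : List (List (String × List (List (String × Int))))), Dom_calculate_streaks weeks_data → Spec_calculate_streaks weeks_data (calculate_streaks weeks_data)

-- ===== LEMMAS AND PROOFS =====

-- length of the leading run of positives
def pvLead : List Int → Int
  | [] => 0
  | c :: r => if c > 0 then 1 + pvLead r else 0

theorem pvALoop_diag (l : List Int) : ∀ s : Int, pvALoop l s s s = (s + pvLead l, s + pvLead l) := by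
  induction l with
  | nil => intro s; simp [pvALoop, pvLead]
  | cons c r ih =>
    intro s
    by_cases hc : c > 0
    · simp only [pvALoop, pvLead, hc, if_pos]
      have : (if s + 1 > s then s + 1 else s) = s + 1 := by simp
      rw [this, ih (s + 1)]
      simp only [Prod.mk.injEq]
      constructor <;> ring
    · simp [pvALoop, pvLead, hc]

theorem pvFlat_eq (w : List (List (String × List (List (String × Int))))) :
    ∀ acc, w.foldl (fun acc week => (pvGetDays week).foldl (fun acc day => acc ++ [pvGetCount day]) acc) acc
      = acc ++ w.flatMap (fun wk => (pvGetDays wk).map pvGetCount) := by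
  have h : ∀ acc, w.foldl (fun acc week => (pvGetDays week).foldl (fun acc day => acc ++ [pvGetCount day]) acc) acc
      = w.foldl (fun acc week => acc ++ (pvGetDays week).map pvGetCount) acc := by
    induction w with
    | nil => intro acc; rfl
    | cons wk rest ih =>
      intro acc
      simp only [List.foldl_cons, PySem.List.foldl_append_singleton_eq_map]
  intro acc
  rw [h, PySem.List.foldl_append_eq_flatMap]

theorem pvLead_append (a b : List Int) :
    pvLead (a ++ b) = if a.all (fun c => decide (c > 0)) then pvLead a + pvLead b else pvLead a := by
  induction a with
  | nil => simp [pvLead]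
  | cons c r ih =>
    by_cases hc : c > 0
    · simp [pvLead, hc, ih]
      split_ifs <;> ring
    · simp [pvLead, hc]

theorem pvBDays_eq (dl : List (List (String × Int))) : ∀ s : Int,
    pvBDays dl s = (s + pvLead (dl.map pvGetCount), !dl.all (fun d => decide (pvGetCount d > 0))) := by
  induction dl with
  | nil => intro s; simp [pvBDays, pvLead]
  | cons d r ih =>
    intro s
    by_cases hd : pvGetCount d > 0
    · simp [pvBDays, hd, ih, pvLead]; ring
    · simp [pvBDays, hd, pvLead]

theorem pvBWeeks_eq (ws : List (List (String × List (List (String × Int))))) : ∀ s : Int,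
    pvBWeeks ws s = s + pvLead (ws.flatMap (fun wk => (pvGetDays wk).reverse.map pvGetCount)) := by
  induction ws with
  | nil => intro s; simp [pvBWeeks, pvLead]
  | cons wk rest ih =>
    intro s
    rw [pvBWeeks, pvBDays_eq]
    by_cases hall : (pvGetDays wk).reverse.all (fun d => decide (pvGetCount d > 0))
    · simp only [hall, Bool.not_true]
      rw [ih, List.flatMap_cons, pvLead_append]
      have : ((pvGetDays wk).reverse.map pvGetCount).all (fun c => decide (c > 0)) = true := by
        simpa [List.all_map] using hall
      rw [if_pos this]; ring
    · simp only [hall, Bool.not_false]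
      rw [List.flatMap_cons, pvLead_append]
      have : ((pvGetDays wk).reverse.map pvGetCount).all (fun c => decide (c > 0)) = false := by
        simp [List.all_map]; simpa using hall
      rw [this]; simp

-- ===== VERDICT (by name: the statement is the Claim_ definition above) =====
theorem calculate_streaks_spec : Claim_equal_calculate_streaks := by
  intro w _
  unfold Spec_calculate_streaks calculate_streaks calculate_streaks_alt
  by_cases hw : w = []
  · subst hw; simp [pvBWeeks]
  · rw [if_neg hw]
    simp only [pvFlat_eq, List.nil_append, pvALoop_diag, pvBWeeks_eq, Int.zero_add]
    rw [List.reverse_flatMap]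
    congr 2 <;> · congr 1; funext wk; simp [Function.comp]
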